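-- pv_equiv track=rewrite | github.com/knutdrand/bnp_assembly | bnp_assembly/scaffold_splitting/__init__.py | count_possible_edge_pairs
-- ===== SOURCE A (Python) =====
-- import typing as tp
--
-- def count_possible_edge_pairs(locations: tp.List[int], edge_locations: tp.List[int], max_length: int):
--     counter = [0 for edge in edge_locations]
--     for edge_idx, edge_location in enumerate(edge_locations):
--         for i, location in enumerate(locations):
--             if location >= edge_location:
--                 break
--             if location < edge_location-max_length:
--                 continue
--             for location2 in locations[i+1:]:
--                 if location2 < edge_location:
--                     continue
--                 if location2 > location+max_length:
--                     break
--                 counter[edge_idx] += 1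
--     return counter
-- ===== SOURCE B (Python) =====
-- import typing as tp
--
-- def _bisect_left(a: tp.List[int], x: int) -> int:
--     # stdlib bisect.bisect_left re-implemented (A's module only imports typing)
--     lo, hi = 0, len(a)
--     while lo < hi:
--         mid = (lo + hi) // 2
--         if a[mid] < x:
--             lo = mid + 1
--         else:
--             hi = mid
--     return lo
--
-- def _bisect_right(a: tp.List[int], x: int) -> int:
--     # stdlib bisect.bisect_right re-implemented
--     lo, hi = 0, len(a)
--     while lo < hi:
--         mid = (lo + hi) // 2
--         if x < a[mid]:
--             hi = mid
--         else:
--             lo = mid + 1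
--     return lo
--
-- def count_possible_edge_pairs(locations: tp.List[int], edge_locations: tp.List[int], max_length: int):
--     # locations sorted ascending: per edge e, the left endpoints are exactly the
--     # contiguous window [bisect_left(e-max_length), bisect_left(e)); for each such x the
--     # number of partners is bisect_right(x+max_length) - bisect_left(e).
--     out = []
--     for e in edge_locations:
--         lo = _bisect_left(locations, e - max_length)
--         hi = _bisect_left(locations, e)
--         total = 0
--         for x in locations[lo:hi]:
--             total += _bisect_right(locations, x + max_length) - hi
--         out.append(total)
--     return out
-- ===== Notes on version B (the rewrite author's own statement) =====
-- stated objective: faster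
-- what changed: Replaces A's per-edge nested pair scan over suffixes by binary-search window counting: for each edge the qualifying left endpoints are the contiguous slice [bisect_left(e-max_length), bisect_left(e)) and each one's partner count is bisect_right(x+max_length) - bisect_left(e), so no pair is ever enumerated.
-- outside the precondition, e.g. on count_possible_edge_pairs([6, 8, 5, 8, 7], [8], 4): A returns [2], B returns [0]
import Mathlib
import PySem

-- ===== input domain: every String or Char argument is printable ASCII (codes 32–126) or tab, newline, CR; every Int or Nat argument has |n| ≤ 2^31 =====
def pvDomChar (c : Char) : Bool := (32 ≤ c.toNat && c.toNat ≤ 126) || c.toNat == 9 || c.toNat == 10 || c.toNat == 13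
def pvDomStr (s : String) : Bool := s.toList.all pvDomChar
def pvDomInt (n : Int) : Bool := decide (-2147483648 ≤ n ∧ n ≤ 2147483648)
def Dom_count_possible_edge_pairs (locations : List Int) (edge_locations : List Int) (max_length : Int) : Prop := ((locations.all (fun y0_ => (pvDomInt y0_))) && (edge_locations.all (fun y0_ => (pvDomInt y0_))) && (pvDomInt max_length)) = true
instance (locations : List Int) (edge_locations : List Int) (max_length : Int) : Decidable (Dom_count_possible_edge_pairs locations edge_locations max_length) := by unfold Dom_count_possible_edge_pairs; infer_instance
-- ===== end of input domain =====

-- B replaces A's per-edge nested pair scans by bisect-window counting (needs locations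
-- sorted ascending, stated in Pre_); proved to return A's exact list under Pre_.


-- ===== PORT A =====
-- inner loop: `for location2 in locations[i+1:]` with continue/break, counting
def cpepInner (x e m : Int) : List Int → Int
  | [] => 0
  | y :: ys =>
      if y < e then cpepInner x e m ys
      else if y > x + m then 0
      else cpepInner x e m ys + 1

-- middle loop: `for i, location in enumerate(locations)` with break/continue;
-- the tail ys IS locations[i+1:]
def cpepOuter (e m : Int) : List Int → Int
  | [] => 0
  | x :: xs =>
      if x ≥ e then 0
      else if x < e - m then cpepOuter e m xs
      else cpepInner x e m xs + cpepOuter e m xs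

-- `counter = [0 ...]` then `counter[edge_idx] += …` per edge = map over edges
def count_possible_edge_pairs (locations : List Int) (edge_locations : List Int) (max_length : Int) : List Int :=
  edge_locations.map (fun e => cpepOuter e max_length locations)

-- ===== PORT B =====
-- Source B's hand-written _bisect_left/_bisect_right are exactly stdlib bisect_left/right,
-- ported as PySem.List.bisectLeft / bisectRight; `locations[lo:hi]` is the drop/take
-- slice (PySem.List.slice_natCast).
def cpepEdgeCount (locations : List Int) (e m : Int) : Int :=
  let lo := PySem.List.bisectLeft locations (e - m)
  let hi := PySem.List.bisectLeft locations e
  ((locations.drop lo).take (hi - lo)).foldl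
    (fun total x => total + ((PySem.List.bisectRight locations (x + m) : Int) - (hi : Int))) 0

def count_possible_edge_pairs_alt (locations : List Int) (edge_locations : List Int) (max_length : Int) : List Int :=
  edge_locations.map (fun e => cpepEdgeCount locations e max_length)

-- ===== PRECONDITION & SPEC =====
-- Pre_ excludes unsorted `locations`, on which A still returns a value: A's early
-- breaks assume locations sorted ascending (the function's stated use), so on
-- unsorted input A's result is an accident of the scan order that a window count
-- cannot (and should not) reproduce.
-- (locations unsorted is admitted anyway when max_length < 0 or edge_locations = [],
-- where both programs trivially return all-zero / empty output.)
def Pre_count_possible_edge_pairs (locations : List Int) (edge_locations : List Int) (max_length : Int) : Prop :=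
  locations.Pairwise (· ≤ ·) ∨ max_length < 0 ∨ edge_locations = []
instance (locations : List Int) (edge_locations : List Int) (max_length : Int) : Decidable (Pre_count_possible_edge_pairs locations edge_locations max_length) := by unfold Pre_count_possible_edge_pairs; infer_instance

def pvWitness_count_possible_edge_pairs : List Int × List Int × Int := ([0, 2, 5, 7], [3, 6], 4)

def Spec_count_possible_edge_pairs (locations : List Int) (edge_locations : List Int) (max_length : Int) (out : List Int) : Prop := out = count_possible_edge_pairs_alt locations edge_locations max_length
instance (locations : List Int) (edge_locations : List Int) (max_length : Int) (out : List Int) : Decidable (Spec_count_possible_edge_pairs locations edge_locations max_length out) := by unfold Spec_count_possible_edge_pairs; infer_instance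

-- ===== CLAIM (what is proved, stated in full; the proofs are below) =====
def Claim_equal_count_possible_edge_pairs : Prop := ∀ (locations : List Int) (edge_locations : List Int) (max_length : Int), Dom_count_possible_edge_pairs locations edge_locations max_length → Pre_count_possible_edge_pairs locations edge_locations max_length → Spec_count_possible_edge_pairs locations edge_locations max_length (count_possible_edge_pairs locations edge_locations max_length)

-- ===== LEMMAS AND PROOFS =====

-- countP of a list whose first r elements satisfy p and the rest do not
lemma countP_eq_of_split (p : Int → Bool) :
    ∀ (a : List Int) (r : Nat), r ≤ a.length →
      (∀ j (hj : j < a.length), (j < r ↔ p a[j] = true)) →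
      a.countP p = r := by
  intro a
  induction a with
  | nil => intro r hr _; simp at hr; simp [hr]
  | cons x xs ih =>
      intro r hr hiff
      cases r with
      | zero =>
          have hx : p x = false := by
            have h0 := hiff 0 (by simp)
            simp at h0
            simpa using h0
          have : xs.countP p = 0 := by
            apply ih 0 (by omega)
            intro j hj
            have := hiff (j+1) (by simpa using Nat.succ_lt_succ hj)
            simpa using this
          simp [List.countP_cons, hx, this]
      | succ r' =>
          have hx : p x = true := by
            have := (hiff 0 (by simp)).1 (by omega)
            simpa using this
          have : xs.countP p = r' := by
            apply ih r' (by simpa using hr)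
            intro j hj
            have := hiff (j+1) (by simpa using Nat.succ_lt_succ hj)
            constructor
            · intro h; exact (by simpa using this.1 (by omega))
            · intro h; have := this.2 (by simpa using h); omega
          simp [List.countP_cons, hx, this]

lemma bl_eq_countLT (L : List Int) (v : Int) (hs : L.Pairwise (· ≤ ·)) :
    PySem.List.bisectLeft L v = L.countP (fun y => decide (y < v)) := by
  obtain ⟨hle, hlt, hge⟩ := PySem.List.bisectLeft_spec L v hs
  symm
  apply countP_eq_of_split _ L _ hle
  intro j hj
  constructor
  · intro h; simpa using hlt j hj h
  · intro h
    by_contra hc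
    have := hge j hj (by omega)
    simp at h; omega

lemma br_eq_countLE (L : List Int) (v : Int) (hs : L.Pairwise (· ≤ ·)) :
    PySem.List.bisectRight L v = L.countP (fun y => decide (y ≤ v)) := by
  obtain ⟨hle, hlt, hge⟩ := PySem.List.bisectRight_spec L v hs
  symm
  apply countP_eq_of_split _ L _ hle
  intro j hj
  constructor
  · intro h; simpa using hlt j hj h
  · intro h
    by_contra hc
    have := hge j hj (by omega)
    simp at h; omega

-- interval split of a ≤-count
lemma count_split (e b : Int) (hb : e ≤ b + 1) :
    ∀ L : List Int,
      L.countP (fun y => decide (y ≤ b)) =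
        L.countP (fun y => decide (y < e)) + L.countP (fun y => decide (e ≤ y) && decide (y ≤ b)) := by
  intro L
  induction L with
  | nil => simp
  | cons x xs ih =>
      by_cases h1 : x < e <;> by_cases h2 : e ≤ x <;> by_cases h3 : x ≤ b <;>
        first
        | omega
        | (simp [List.countP_cons, h1, h2, h3, ih]; omega)
        | simp [List.countP_cons, h1, h2, h3, ih]

-- A's inner loop counts the tail's elements in [e, x+m] (tail sorted)
lemma inner_eq_count (x e m : Int) :
    ∀ xs : List Int, xs.Pairwise (· ≤ ·) →
      cpepInner x e m xs = (xs.countP (fun y => decide (e ≤ y) && decide (y ≤ x + m)) : Int) := by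
  intro xs
  induction xs with
  | nil => simp [cpepInner]
  | cons y ys ih =>
      intro hs
      have hys : ys.Pairwise (· ≤ ·) := hs.of_cons
      have hyall : ∀ z ∈ ys, y ≤ z := fun z hz => List.rel_of_pairwise_cons hs hz
      by_cases h1 : y < e
      · have hy : (decide (e ≤ y) && decide (y ≤ x + m)) = false := by simp; omega
        rw [show cpepInner x e m (y :: ys) = cpepInner x e m ys from by simp [cpepInner, h1]]
        rw [List.countP_cons, hy, ih hys]
        simp
      · by_cases h2 : y > x + m
        · have hzero : (y :: ys).countP (fun z => decide (e ≤ z) && decide (z ≤ x + m)) = 0 := by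
            rw [List.countP_eq_zero]
            intro z hz
            rcases List.mem_cons.mp hz with h | h
            · subst h; simp; omega
            · have := hyall z h; simp; omega
          rw [show cpepInner x e m (y :: ys) = 0 from by simp [cpepInner, h1, h2], hzero]
          simp
        · have hy : (decide (e ≤ y) && decide (y ≤ x + m)) = true := by simp; omega
          rw [show cpepInner x e m (y :: ys) = cpepInner x e m ys + 1 from by simp [cpepInner, h1, h2]]
          rw [List.countP_cons, hy, ih hys]
          simp [add_comm]

-- A's middle loop as a sum over the qualifying left endpoints, with counts over the
-- full list L = P ++ l
lemma outer_eq_sum (e m : Int) (L : List Int) (hs : L.Pairwise (· ≤ ·)) :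
    ∀ (l P : List Int), L = P ++ l →
      cpepOuter e m l =
        ((l.filter (fun x => decide (e - m ≤ x) && decide (x < e))).map
          (fun x => (L.countP (fun y => decide (e ≤ y) && decide (y ≤ x + m)) : Int))).sum := by
  intro l
  induction l with
  | nil => simp [cpepOuter]
  | cons x xs ih =>
      intro P hL
      have hsl : (x :: xs).Pairwise (· ≤ ·) := by
        rw [hL] at hs; exact (List.pairwise_append.mp hs).2.1
      have hxall : ∀ z ∈ xs, x ≤ z := fun z hz => List.rel_of_pairwise_cons hsl hz
      have hPall : ∀ y ∈ P, y ≤ x := by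
        intro y hy
        rw [hL] at hs
        exact (List.pairwise_append.mp hs).2.2 y hy x (by simp)
      by_cases h1 : x ≥ e
      · have hnil : (x :: xs).filter (fun z => decide (e - m ≤ z) && decide (z < e)) = [] := by
          rw [List.filter_eq_nil_iff]
          intro z hz
          rcases List.mem_cons.mp hz with h | h
          · subst h; simp; omega
          · have := hxall z h; simp; omega
        rw [show cpepOuter e m (x :: xs) = 0 from by simp [cpepOuter, h1], hnil]
        simp
      · by_cases h2 : x < e - m
        · rw [show cpepOuter e m (x :: xs) = cpepOuter e m xs by simp [cpepOuter, h1, h2]]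
          rw [ih (P ++ [x]) (by simp [hL])]
          rw [List.filter_cons_of_neg (by simp; omega)]
        · have hinner : cpepInner x e m xs =
              (L.countP (fun y => decide (e ≤ y) && decide (y ≤ x + m)) : Int) := by
            rw [inner_eq_count x e m xs hsl.of_cons, hL]
            congr 1
            have hP0 : P.countP (fun y => decide (e ≤ y) && decide (y ≤ x + m)) = 0 := by
              rw [List.countP_eq_zero]
              intro z hz; have := hPall z hz; simp; omega
            have hx0 : (decide (e ≤ x) && decide (x ≤ x + m)) = false := by simp; omega
            rw [List.countP_append, List.countP_cons, hP0, hx0]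
            simp
          rw [show cpepOuter e m (x :: xs) = cpepInner x e m xs + cpepOuter e m xs by
                simp [cpepOuter, h1, h2]]
          rw [ih (P ++ [x]) (by simp [hL]), hinner]
          rw [List.filter_cons_of_pos (by simp; omega)]
          rw [List.map_cons, List.sum_cons]
  
-- the bisect window slice is exactly the filter of qualifying left endpoints
lemma slice_eq_filter (c d : Int) :
    ∀ L : List Int, L.Pairwise (· ≤ ·) →
      (L.drop (L.countP (fun y => decide (y < c)))).take
          (L.countP (fun y => decide (y < d)) - L.countP (fun y => decide (y < c))) =
        L.filter (fun x => decide (c ≤ x) && decide (x < d)) := by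
  intro L
  induction L with
  | nil => simp
  | cons x xs ih =>
      intro hs
      have hxs : xs.Pairwise (· ≤ ·) := hs.of_cons
      have hxall : ∀ z ∈ xs, x ≤ z := fun z hz => List.rel_of_pairwise_cons hs hz
      by_cases h1 : x < c
      · by_cases h2' : x < d
        · simp only [List.countP_cons, List.filter_cons]
          simp [h1, h2', show ¬ c ≤ x by omega]
          exact ih hxs
        · -- d ≤ x < c: window empty and filter empty
          have hcd : d ≤ c := by omega
          have hmono : xs.countP (fun y => decide (y < d)) ≤ xs.countP (fun y => decide (y < c)) := by
            apply List.countP_mono_left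
            intro a _ h; simp at h ⊢; omega
          have hnil : (x :: xs).filter (fun z => decide (c ≤ z) && decide (z < d)) = [] := by
            rw [List.filter_eq_nil_iff]; intro z _; simp; omega
          simp only [List.countP_cons]
          simp [h1, h2', hnil]
          omega
      · by_cases h2 : x < d
        · -- c ≤ x < d
          have hc0 : xs.countP (fun y => decide (y < c)) = 0 := by
            rw [List.countP_eq_zero]; intro z hz; have := hxall z hz; simp; omega
          have hc0' : (x :: xs).countP (fun y => decide (y < c)) = 0 := by
            rw [List.countP_eq_zero]
            intro z hz
            rcases List.mem_cons.mp hz with h | h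
            · subst h; simp; omega
            · have := hxall z h; simp; omega
          have hrec := ih hxs
          rw [hc0] at hrec
          simp only [List.countP_cons, List.filter_cons, hc0]
          simp [show ¬ x < c from h1, h2, show c ≤ x by omega]
          simpa using hrec
        · -- d ≤ x ≤ everything: both sides empty
          have hc0 : (x :: xs).countP (fun y => decide (y < c)) = 0 := by
            rw [List.countP_eq_zero]
            intro z hz
            rcases List.mem_cons.mp hz with h | h
            · subst h; simp; omega
            · have := hxall z h; simp; omega
          have hd0 : (x :: xs).countP (fun y => decide (y < d)) = 0 := by
            rw [List.countP_eq_zero]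
            intro z hz
            rcases List.mem_cons.mp hz with h | h
            · subst h; simp; omega
            · have := hxall z h; simp; omega
          have hnil : (x :: xs).filter (fun z => decide (c ≤ z) && decide (z < d)) = [] := by
            rw [List.filter_eq_nil_iff]
            intro z hz
            rcases List.mem_cons.mp hz with h | h
            · subst h; simp; omega
            · have := hxall z h; simp; omega
          rw [hc0, hd0, hnil]
          simp

lemma foldl_add_eq_sum (t : Int → Int) :
    ∀ (s : List Int) (a : Int), s.foldl (fun acc x => acc + t x) a = a + (s.map t).sum := by
  intro s
  induction s with
  | nil => simp
  | cons x xs ih => intro a; simp [List.foldl_cons, ih]; ring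

-- per edge, A's count equals B's bisect-window count
lemma edge_count_eq (L : List Int) (hs : L.Pairwise (· ≤ ·)) (e m : Int) :
    cpepOuter e m L = cpepEdgeCount L e m := by
  rw [outer_eq_sum e m L hs L [] rfl]
  unfold cpepEdgeCount
  dsimp only
  rw [bl_eq_countLT L (e - m) hs, bl_eq_countLT L e hs]
  rw [slice_eq_filter (e - m) e L hs]
  rw [foldl_add_eq_sum]
  rw [zero_add]
  apply congrArg
  apply List.map_congr_left
  intro x hx
  have hx' : e - m ≤ x ∧ x < e := by simpa using List.of_mem_filter hx
  rw [br_eq_countLE L (x + m) hs]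
  rw [count_split e (x + m) (by omega) L]
  push_cast
  ring

-- with a negative max_length no pair can straddle: A's middle loop never reaches its
-- inner loop, and B's bisect window [bisect(e-m), bisect(e)) is empty (bisectLeft is
-- monotone in the probe even on unsorted lists), so both sides are 0 per edge
lemma blLoop_ge (xs : List Int) (x : Int) :
    ∀ (fuel lo hi : Nat), lo ≤ PySem.List.bisectLeftLoop xs x fuel lo hi := by
  intro fuel
  induction fuel with
  | zero => intro lo hi; simp [PySem.List.bisectLeftLoop]
  | succ n ih =>
      intro lo hi
      rw [PySem.List.bisectLeftLoop]
      split
      · rcases hmem : xs[(lo + hi) / 2]? with _ | y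
        · simp
        · simp only
          split
          · exact le_trans (by omega) (ih ((lo + hi) / 2 + 1) hi)
          · exact ih lo ((lo + hi) / 2)
      · exact le_refl lo

lemma blLoop_le (xs : List Int) (x : Int) :
    ∀ (fuel lo hi : Nat), lo ≤ hi → PySem.List.bisectLeftLoop xs x fuel lo hi ≤ hi := by
  intro fuel
  induction fuel with
  | zero => intro lo hi h; simpa [PySem.List.bisectLeftLoop] using h
  | succ n ih =>
      intro lo hi h
      rw [PySem.List.bisectLeftLoop]
      split
      · rcases hmem : xs[(lo + hi) / 2]? with _ | y
        · simpa using h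
        · simp only
          split
          · exact ih ((lo + hi) / 2 + 1) hi (by omega)
          · exact le_trans (ih lo ((lo + hi) / 2) (by omega)) (by omega)
      · exact h

lemma blLoop_mono (xs : List Int) (x1 x2 : Int) (hx : x1 ≤ x2) :
    ∀ (fuel lo hi : Nat),
      PySem.List.bisectLeftLoop xs x1 fuel lo hi ≤ PySem.List.bisectLeftLoop xs x2 fuel lo hi := by
  intro fuel
  induction fuel with
  | zero => intro lo hi; simp [PySem.List.bisectLeftLoop]
  | succ n ih =>
      intro lo hi
      rw [PySem.List.bisectLeftLoop, PySem.List.bisectLeftLoop]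
      split
      · rcases hmem : xs[(lo + hi) / 2]? with _ | y
        · simp
        · simp only
          by_cases h1 : y < x1
        
          · rw [if_pos h1, if_pos (show y < x2 by omega)]
            exact ih ((lo + hi) / 2 + 1) hi
          · by_cases h2 : y < x2
            · rw [if_neg h1, if_pos h2]
              calc PySem.List.bisectLeftLoop xs x1 n lo ((lo + hi) / 2)
                  ≤ (lo + hi) / 2 := blLoop_le xs x1 n lo ((lo + hi) / 2) (by omega)
                _ ≤ PySem.List.bisectLeftLoop xs x2 n ((lo + hi) / 2 + 1) hi := by
                    have := blLoop_ge xs x2 n ((lo + hi) / 2 + 1) hi; omega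
            · rw [if_neg h1, if_neg h2]
              exact ih lo ((lo + hi) / 2)
      · exact le_refl lo

lemma bl_mono (xs : List Int) (x1 x2 : Int) (hx : x1 ≤ x2) :
    PySem.List.bisectLeft xs x1 ≤ PySem.List.bisectLeft xs x2 := by
  unfold PySem.List.bisectLeft
  exact blLoop_mono xs x1 x2 hx xs.length 0 xs.length

lemma outer_zero_of_neg (e m : Int) (hm : m < 0) :
    ∀ l : List Int, cpepOuter e m l = 0 := by
  intro l
  induction l with
  | nil => simp [cpepOuter]
  | cons x xs ih =>
      by_cases h1 : x ≥ e
      · simp [cpepOuter, h1]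
      · have h2 : x < e - m := by omega
        simp [cpepOuter, h1, h2, ih]

lemma edge_zero_of_neg (L : List Int) (e m : Int) (hm : m < 0) :
    cpepEdgeCount L e m = 0 := by
  unfold cpepEdgeCount
  dsimp only
  have hle : PySem.List.bisectLeft L e ≤ PySem.List.bisectLeft L (e - m) :=
    bl_mono L e (e - m) (by omega)
  rw [show PySem.List.bisectLeft L e - PySem.List.bisectLeft L (e - m) = 0 from by omega]
  simp

-- ===== VERDICT (by name: the statement is the Claim_ definition above) =====
theorem count_possible_edge_pairs_spec : Claim_equal_count_possible_edge_pairs := by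
  intro locations edge_locations max_length _ hpre
  unfold Spec_count_possible_edge_pairs count_possible_edge_pairs count_possible_edge_pairs_alt
  rcases hpre with hs | hm | hemp
  · apply List.map_congr_left
    intro e _
    exact edge_count_eq locations hs e max_length
  · apply List.map_congr_left
    intro e _
    rw [outer_zero_of_neg e max_length hm locations,
        edge_zero_of_neg locations e max_length hm]
  · rw [hemp]; rfl
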